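-- pv_equiv track=rewrite | github.com/yueruoyu/lspt | PY110/spot/ex9.py | transform
-- ===== SOURCE A (Python) =====
-- def transform(word):
--     alpha_list =[]
--     for char in word:
--         if char.isalpha():
--             alpha_list.append(char)
--     sorted_list = list(reversed([alpha_list[0]] +
--         sorted(alpha_list[1:-1]) + [alpha_list[-1]]))
--     return_lst = []
--     for char in word:
--         if not char.isalpha():
--             return_lst.append(char)
--         else:
--             return_lst.append(sorted_list.pop())
--     return ''.join(return_lst)
-- ===== SOURCE B (Python) =====
-- def transform(word):
--     # Segment decomposition + counting sort: find the first/last alphabetic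
--     # positions by scanning from each end, histogram the middle alphabetic
--     # characters by code, replay the histogram into the middle segment, and
--     # concatenate prefix + rebuilt middle + suffix.
--     n = len(word)
--     i = 0
--     while i < n and not word[i].isalpha():
--         i += 1
--     if i == n:
--         return word
--     j = n
--     while not word[j - 1].isalpha():
--         j -= 1
--     if j - 1 == i:
--         return word
--     counts = [0] * 128
--     for c in word[i + 1:j - 1]:
--         if c.isalpha():
--             counts[ord(c)] += 1
--     stream = []
--     for code in range(128):
--         stream.extend(chr(code) * counts[code])
--     out = []
--     k = 0
--     for c in word[i + 1:j - 1]: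
--         if c.isalpha():
--             out.append(stream[k])
--             k += 1
--         else:
--             out.append(c)
--     return word[:i + 1] + ''.join(out) + word[j - 1:]
-- ===== Notes on version B (the rewrite author's own statement) =====
-- stated objective: alternative
-- what changed: B replaces A's filter-everything + comparison sort + reversed-pop replay over the whole word by a segment decomposition: it scans for the first and last alphabetic index from each end, histograms the middle alphabetic characters into a 128-entry counting-sort table, rebuilds only the middle segment from that table, and concatenates prefix + middle + suffix.
-- crash fix: On words with no alphabetic character A raises IndexError (alpha_list[0] on an empty list); B returns the word unchanged. — e.g. on transform("1 2"): A raises IndexError, B returns "1 2"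
import Mathlib
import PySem

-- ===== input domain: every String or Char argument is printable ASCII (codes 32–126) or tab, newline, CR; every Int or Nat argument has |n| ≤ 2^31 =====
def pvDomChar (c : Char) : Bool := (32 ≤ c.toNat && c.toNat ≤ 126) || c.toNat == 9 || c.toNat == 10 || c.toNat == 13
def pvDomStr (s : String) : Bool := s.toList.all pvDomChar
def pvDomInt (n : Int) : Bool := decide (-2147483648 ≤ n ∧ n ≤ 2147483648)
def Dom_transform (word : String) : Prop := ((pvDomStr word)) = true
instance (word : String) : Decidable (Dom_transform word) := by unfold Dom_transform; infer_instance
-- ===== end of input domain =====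

-- B replaces A's filter + comparison sort + reversed-pop replay over the whole word by a segment
-- decomposition (scan for the first/last alphabetic index from each end, rebuild only the middle
-- segment) with a counting sort over ASCII codes (objective: alternative).

-- ===== PORT A =====
def transform (word : String) : String :=
  let alpha_list := word.toList.foldl
    (fun acc c => if PySem.Chars.isalpha c then acc ++ [c] else acc) ([] : List Char)
  match PySem.List.pyGet? alpha_list 0, PySem.List.pyGet? alpha_list (-1) with
  | some a0, some alast =>
    let sorted_list :=
      ([a0] ++ PySem.List.sorted (PySem.List.slice alpha_list (some 1) (some (-1))) (fun c => c) false
        ++ [alast]).reverse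
    let r := word.toList.foldl
      (fun (st : List Char × List Char) c =>
        if PySem.Chars.isalpha c = false then (st.1 ++ [c], st.2)
        else
          match PySem.List.pop? st.2 with
          | some (v, rest) => (st.1 ++ [v], rest)
          | none => st)
      (([] : List Char), sorted_list)
    String.ofList r.1
  | _, _ => word   -- unreachable under Pre_: Python A raises IndexError when no char is alphabetic

-- ===== PORT B =====
-- while i < n and not word[i].isalpha(): i += 1   (fuel only makes the recursion structural;
-- called with fuel = n, which the scan can never exhaust)
def findFirstAlpha (cs : List Char) (n : Nat) : Nat → Nat → Nat
  | i, 0 => i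
  | i, fuel + 1 =>
    if i < n then
      if PySem.Chars.isalpha (cs.getD i ' ') then i else findFirstAlpha cs n (i + 1) fuel
    else i

-- while not word[j - 1].isalpha(): j -= 1   (the j = 0 base case only makes the recursion
-- total; under Pre_ the scan stops at an alphabetic character before reaching 0)
def findLastAlpha (cs : List Char) : Nat → Nat
  | 0 => 0
  | j + 1 =>
    if PySem.Chars.isalpha (cs.getD (j + 1 - 1) ' ') then j + 1 else findLastAlpha cs j

def transform_alt (word : String) : String :=
  let cs := word.toList
  let n := cs.length
  let i := findFirstAlpha cs n 0 n
  if i = n then word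
  else
    let j := findLastAlpha cs n
    if j - 1 = i then word
    else
      let mid := PySem.List.slice cs (some ((i : Int) + 1)) (some ((j : Int) - 1))
      let counts := mid.foldl
        (fun (cnt : List Nat) c =>
          if PySem.Chars.isalpha c then cnt.set c.toNat (cnt.getD c.toNat 0 + 1) else cnt)
        (List.replicate 128 0)
      let stream := (List.range 128).foldl
        (fun acc code => acc ++ List.replicate (counts.getD code 0) (Char.ofNat code))
        ([] : List Char)
      let out := mid.foldl
        (fun (st : List Char × Nat) c =>
          if PySem.Chars.isalpha c then (st.1 ++ [stream.getD st.2 ' '], st.2 + 1)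
          else (st.1 ++ [c], st.2))
        (([] : List Char), 0)
      String.ofList (PySem.List.slice cs none (some ((i : Int) + 1)) ++ out.1
        ++ PySem.List.slice cs (some ((j : Int) - 1)) none)

-- ===== PRECONDITION & SPEC =====
-- Pre_ excludes exactly the words with no alphabetic character, on which Python A raises IndexError.
def Pre_transform (word : String) : Prop :=
  word.toList.any (fun c => PySem.Chars.isalpha c) = true
instance (word : String) : Decidable (Pre_transform word) := by unfold Pre_transform; infer_instance
def pvWitness_transform : String := "ba"

-- On words with no alphabetic character A raises IndexError (alpha_list[0]); B returns the word unchanged.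
def Raises_transform (word : String) : Prop :=
  word.toList.any (fun c => PySem.Chars.isalpha c) = false
instance (word : String) : Decidable (Raises_transform word) := by unfold Raises_transform; infer_instance
def pvRaiseWitness_transform : String := "1 2"
def pvRaiseWitnessOut_transform : String := "1 2"

def Spec_transform (word : String) (out : String) : Prop := out = transform_alt word
instance (word : String) (out : String) : Decidable (Spec_transform word out) := by unfold Spec_transform; infer_instance

-- ===== CLAIM (what is proved, stated in full; the proofs are below) =====
def Claim_equal_transform : Prop := ∀ (word : String), Dom_transform word → Pre_transform word → Spec_transform word (transform word)
def Claim_raises_transform : Prop := (∀ (word : String), Dom_transform word → Raises_transform word → ¬ Pre_transform word) ∧ (Dom_transform (pvRaiseWitness_transform) ∧ Raises_transform (pvRaiseWitness_transform) ∧ transform_alt (pvRaiseWitness_transform) = pvRaiseWitnessOut_transform)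

-- ===== LEMMAS AND PROOFS =====

-- the common semantics both programs reduce to: walk the segment, copy non-alphabetic characters,
-- replace the alphabetic ones in order by the next element of the replacement sequence S
def fillSeq : List Char → List Char → List Char
  | [], _ => []
  | c :: cs, S =>
    if PySem.Chars.isalpha c then
      match S with
      | [] => c :: fillSeq cs []
      | s :: S' => s :: fillSeq cs S'
    else c :: fillSeq cs S

theorem fill_append (xs ys S : List Char) :
    fillSeq (xs ++ ys) S
      = fillSeq xs S ++ fillSeq ys (S.drop (xs.countP (fun c => PySem.Chars.isalpha c))) := by
  induction xs generalizing S with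
  | nil => simp [fillSeq]
  | cons c xs ih =>
    by_cases hc : PySem.Chars.isalpha c
    · cases S with
      | nil => simp [fillSeq, hc, ih, List.countP_cons]
      | cons s S' => simp [fillSeq, hc, ih, List.countP_cons]
    · simp [fillSeq, hc, ih, List.countP_cons]

theorem fill_nonalpha (t S : List Char) (h : ∀ c ∈ t, PySem.Chars.isalpha c = false) :
    fillSeq t S = t := by
  induction t generalizing S with
  | nil => simp [fillSeq]
  | cons c t ih =>
    have hc := h c (by simp)
    simp [fillSeq, hc]
    exact ih S (fun c hm => h c (by simp [hm]))

theorem fill_extra (xs S T : List Char) (h : xs.countP (fun c => PySem.Chars.isalpha c) ≤ S.length) :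
    fillSeq xs (S ++ T) = fillSeq xs S := by
  induction xs generalizing S with
  | nil => simp [fillSeq]
  | cons c xs ih =>
    by_cases hc : PySem.Chars.isalpha c
    · cases S with
      | nil => simp [List.countP_cons, hc] at h
      | cons s S' =>
        simp only [List.countP_cons, hc, if_pos] at h
        simp [fillSeq, hc]
        exact ih S' (by simpa using h)
    · simp [fillSeq, hc]
      exact ih S (by simpa [List.countP_cons, hc] using h)

theorem fill_filter_self (cs T : List Char) :
    fillSeq cs (cs.filter (fun c => PySem.Chars.isalpha c) ++ T) = cs := by
  induction cs generalizing T with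
  | nil => simp [fillSeq]
  | cons c cs ih =>
    by_cases hc : PySem.Chars.isalpha c
    · simp [List.filter_cons, hc, fillSeq, ih]
    · simp [List.filter_cons, hc, fillSeq, ih]

theorem loopA (cs : List Char) (S acc : List Char)
    (h : cs.countP (fun c => PySem.Chars.isalpha c) ≤ S.length) :
    cs.foldl
      (fun (st : List Char × List Char) c =>
        if PySem.Chars.isalpha c = false then (st.1 ++ [c], st.2)
        else
          match PySem.List.pop? st.2 with
          | some (v, rest) => (st.1 ++ [v], rest)
          | none => st)
      (acc, S.reverse)
    = (acc ++ fillSeq cs S,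
        (S.drop (cs.countP (fun c => PySem.Chars.isalpha c))).reverse) := by
  induction cs generalizing S acc with
  | nil => simp [fillSeq]
  | cons c cs ih =>
    by_cases hc : PySem.Chars.isalpha c
    · cases S with
      | nil => simp [List.countP_cons, hc] at h
      | cons s S' =>
        simp only [List.countP_cons, hc, if_pos] at h
        simp only [List.foldl_cons, hc, Bool.true_eq_false, if_false, List.reverse_cons,
          PySem.List.pop?_last]
        rw [ih S' (acc ++ [s]) (by simpa using h)]
        simp [fillSeq, hc, List.countP_cons]
    · have hc' : PySem.Chars.isalpha c = false := by simpa using hc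
      simp only [List.foldl_cons, hc', if_pos]
      rw [ih S (acc ++ [c]) (by simpa [List.countP_cons, hc'] using h)]
      simp [fillSeq, hc, List.countP_cons]

theorem loopB (cs : List Char) (stream : List Char) (acc : List Char) (k : Nat)
    (h : cs.countP (fun c => PySem.Chars.isalpha c) + k ≤ stream.length) :
    cs.foldl
      (fun (st : List Char × Nat) c =>
        if PySem.Chars.isalpha c then (st.1 ++ [stream.getD st.2 ' '], st.2 + 1)
        else (st.1 ++ [c], st.2))
      (acc, k)
    = (acc ++ fillSeq cs (stream.drop k), k + cs.countP (fun c => PySem.Chars.isalpha c)) := by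
  induction cs generalizing acc k with
  | nil => simp [fillSeq]
  | cons c cs ih =>
    by_cases hc : PySem.Chars.isalpha c
    · simp only [List.countP_cons, hc, if_pos] at h
      have hk : k < stream.length := by omega
      simp only [List.foldl_cons, hc, if_pos]
      rw [ih (acc ++ [stream.getD k ' ']) (k + 1) (by omega)]
      rw [List.getD_eq_getElem stream ' ' hk, List.drop_eq_getElem_cons hk]
      simp [fillSeq, hc, List.countP_cons]
      omega
    · simp only [List.foldl_cons, hc, if_neg, Bool.false_eq_true, not_false_iff]
      rw [ih (acc ++ [c]) k (by simpa [List.countP_cons, hc] using h)]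
      simp [fillSeq, hc, List.countP_cons]

theorem alpha_toNat_lt (c : Char) (h : PySem.Chars.isalpha c = true) : c.toNat < 128 := by
  simp only [PySem.Chars.isalpha, PySem.Chars.isupper, PySem.Chars.islower, Bool.or_eq_true,
    Bool.and_eq_true, decide_eq_true_eq, Char.le_def] at h
  simp only [Char.toNat]
  rcases h with ⟨h1, h2⟩ | ⟨h1, h2⟩ <;> revert h2 <;> simp [UInt32.le_iff_toNat_le] <;> omega

theorem toNat_ofNat_lt (n : Nat) (h : n < 128) : (Char.ofNat n).toNat = n := by
  rw [Char.toNat_ofNat, if_pos]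
  exact Or.inl (by omega)

theorem hist_getD (l : List Char) (cnt : List Nat) (code : Nat)
    (hl : ∀ c ∈ l, PySem.Chars.isalpha c = true → c.toNat < cnt.length) :
    (l.foldl
      (fun (cnt : List Nat) c =>
        if PySem.Chars.isalpha c then cnt.set c.toNat (cnt.getD c.toNat 0 + 1) else cnt)
      cnt).getD code 0
    = cnt.getD code 0
        + (l.filter (fun c => PySem.Chars.isalpha c)).countP (fun c => c.toNat == code) := by
  induction l generalizing cnt with
  | nil => simp
  | cons c l ih =>
    by_cases hc : PySem.Chars.isalpha c
    · have hlt : c.toNat < cnt.length := hl c (by simp) hc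
      simp only [List.foldl_cons, hc, if_pos]
      rw [ih (cnt.set c.toNat (cnt.getD c.toNat 0 + 1))
        (fun x hm ha => by rw [List.length_set]; exact hl x (by simp [hm]) ha)]
      simp only [List.filter_cons, hc, List.countP_cons]
      by_cases hcode : c.toNat = code
      · subst hcode
        simp [List.getD_eq_getElem?_getD, List.getElem?_set, hlt]
        omega
      · simp [List.getD_eq_getElem?_getD, List.getElem?_set, hcode]
    · simp only [List.foldl_cons, hc, if_neg, Bool.false_eq_true, not_false_iff]
      rw [ih cnt (fun x hm ha => hl x (by simp [hm]) ha)]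
      simp [List.filter_cons, hc]

theorem sum_range_delta (n t : Nat) (f : Nat → Nat) (h : t < n) :
    ((List.range n).map (fun c => if c = t then f c else 0)).sum = f t := by
  induction n with
  | zero => omega
  | succ n ih =>
    rw [List.range_succ]
    by_cases ht : t = n
    · subst ht
      have : ((List.range t).map (fun c => if c = t then f c else 0)).sum = 0 := by
        apply List.sum_eq_zero
        intro x hx
        simp only [List.mem_map, List.mem_range] at hx
        obtain ⟨c, hc, rfl⟩ := hx
        simp [Nat.ne_of_lt hc]
      simp [this]
    · have hlt : t < n := by omega
      simp [ih hlt]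
      exact fun h => (ht h.symm).elim

theorem findFirst_go (cs : List Char) (d : Nat) : ∀ i : Nat, cs.length - i ≤ d →
    (cs.drop i).any (fun c => PySem.Chars.isalpha c) = true →
    findFirstAlpha cs cs.length i d
      = i + ((cs.drop i).takeWhile (fun c => !PySem.Chars.isalpha c)).length := by
  induction d with
  | zero =>
    intro i hd hany
    have : cs.drop i = [] := List.drop_eq_nil_of_le (by omega)
    rw [this] at hany
    simp at hany
  | succ d ih =>
    intro i hd hany
    by_cases hi : i < cs.length
    · rw [findFirstAlpha]
      rw [if_pos hi, List.getD_eq_getElem cs ' ' hi]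
      rw [List.drop_eq_getElem_cons hi] at hany ⊢
      by_cases hc : PySem.Chars.isalpha cs[i]
      · simp [hc]
      · have hc' : PySem.Chars.isalpha cs[i] = false := by simpa using hc
        rw [if_neg (by simp [hc'])]
        have hany' : (cs.drop (i + 1)).any (fun c => PySem.Chars.isalpha c) = true := by
          simp only [List.any_cons, hc', Bool.false_or] at hany
          exact hany
        rw [ih (i + 1) (by omega) hany']
        simp only [List.takeWhile_cons, hc', Bool.not_false, if_pos, List.length_cons]
        omega
    · exfalso
      rw [List.drop_eq_nil_of_le (by omega)] at hany
      simp at hany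

theorem findLast_go (cs : List Char) : ∀ j : Nat, j ≤ cs.length →
    (cs.take j).any (fun c => PySem.Chars.isalpha c) = true →
    findLastAlpha cs j
      = j - ((cs.take j).reverse.takeWhile (fun c => !PySem.Chars.isalpha c)).length := by
  intro j
  induction j with
  | zero => intro _ hany; simp at hany
  | succ j ih =>
    intro hj hany
    have hjlt : j < cs.length := by omega
    have htake : cs.take (j + 1) = cs.take j ++ [cs[j]] := by
      rw [List.take_add_one, List.getElem?_eq_getElem hjlt]
      rfl
    rw [findLastAlpha]
    have hj1 : j + 1 - 1 = j := by omega
    rw [hj1, List.getD_eq_getElem cs ' ' hjlt]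
    by_cases hc : PySem.Chars.isalpha cs[j]
    · rw [if_pos hc, htake, List.reverse_append]
      simp [List.takeWhile_cons, hc]
    · have hc' : PySem.Chars.isalpha cs[j] = false := by simpa using hc
      rw [if_neg (by simp [hc'])]
      have hany' : (cs.take j).any (fun c => PySem.Chars.isalpha c) = true := by
        rw [htake] at hany
        simp only [List.any_append, List.any_cons, List.any_nil, hc'] at hany
        simpa using hany
      rw [ih (by omega) hany']
      rw [htake, List.reverse_append]
      have hlen : ((cs.take j).reverse.takeWhile (fun c => !PySem.Chars.isalpha c)).length
          ≤ (cs.take j).length := by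
        have h1 := (List.takeWhile_sublist
          (p := fun c => !PySem.Chars.isalpha c) (l := (cs.take j).reverse)).length_le
        simpa using h1
      simp only [List.reverse_cons, List.reverse_nil, List.nil_append, List.cons_append,
        List.takeWhile_cons, hc', Bool.not_false, if_pos, List.length_cons]
      omega

theorem char_le_of_toNat_le (a b : Char) (h : a.toNat ≤ b.toNat) : a ≤ b := by
  rw [Char.le_def, UInt32.le_iff_toNat_le]; exact h

theorem toNat_inj (a b : Char) (h : a.toNat = b.toNat) : a = b := by
  have := congrArg Char.ofNat h
  rwa [Char.ofNat_toNat, Char.ofNat_toNat] at this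

theorem stream_pairwise (counts : List Nat) :
    ((List.range 128).flatMap
      (fun code => List.replicate (counts.getD code 0) (Char.ofNat code))).Pairwise
        (fun a b => a ≤ b) := by
  rw [List.pairwise_flatMap]
  constructor
  · intro a _
    rw [List.pairwise_replicate]
    right; exact le_refl _
  · rw [List.pairwise_iff_getElem]
    intro a b ha hb hab x hx y hy
    rw [List.eq_of_mem_replicate hx, List.eq_of_mem_replicate hy]
    simp only [List.length_range] at ha hb
    rw [List.getElem_range, List.getElem_range]
    apply char_le_of_toNat_le
    rw [toNat_ofNat_lt _ (by omega), toNat_ofNat_lt _ (by omega)]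
    omega

theorem count_stream (counts : List Nat) (v : Char) (hv : v.toNat < 128) :
    ((List.range 128).flatMap
      (fun code => List.replicate (counts.getD code 0) (Char.ofNat code))).count v
      = counts.getD v.toNat 0 := by
  rw [List.count_flatMap]
  have hmap : (List.map (List.count v ∘ fun code => List.replicate (counts.getD code 0) (Char.ofNat code)) (List.range 128))
      = (List.range 128).map (fun code => if code = v.toNat then counts.getD code 0 else 0) := by
    apply List.map_congr_left
    intro code hcode
    simp only [List.mem_range] at hcode
    simp only [Function.comp_apply, List.count_replicate]
    by_cases hc : code = v.toNat
    · subst hc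
      rw [if_pos (by rw [Char.ofNat_toNat]; exact beq_self_eq_true v), if_pos rfl]
    · rw [if_neg ?_, if_neg hc]
      intro hbeq
      have : Char.ofNat code = v := by simpa using hbeq
      exact hc (by rw [← this, toNat_ofNat_lt code hcode])
  rw [hmap, sum_range_delta 128 v.toNat _ hv]

theorem getD_replicate_zero (n code : Nat) : (List.replicate n (0 : Nat)).getD code 0 = 0 := by
  rw [List.getD_eq_getElem?_getD, List.getElem?_replicate]
  by_cases h : code < n <;> simp [h]

theorem takeWhile_nonalpha (t rest : List Char) (a0 : Char)
    (ht : ∀ c ∈ t, PySem.Chars.isalpha c = false) (ha0 : PySem.Chars.isalpha a0 = true) :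
    (t ++ a0 :: rest).takeWhile (fun c => !PySem.Chars.isalpha c) = t := by
  induction t with
  | nil => simp [List.takeWhile_cons, ha0]
  | cons c t ih =>
    have hc := ht c (by simp)
    simp only [List.cons_append, List.takeWhile_cons, hc, Bool.not_false, if_pos]
    rw [ih (fun x hm => ht x (by simp [hm]))]

theorem head_eq_of_eq_cons {α : Type} {l : List α} {a : α} {r : List α}
    (h : l = a :: r) (hne : l ≠ []) : l.head hne = a := by
  subst h; rfl

theorem first_eq (cs t rest : List Char) (a0 : Char)
    (hcs : cs = t ++ a0 :: rest)
    (ht : ∀ c ∈ t, PySem.Chars.isalpha c = false) (ha0 : PySem.Chars.isalpha a0 = true) :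
    findFirstAlpha cs cs.length 0 cs.length = t.length := by
  have hany : cs.any (fun c => PySem.Chars.isalpha c) = true := by
    rw [hcs]; simp [List.any_append, ha0]
  have htw : cs.takeWhile (fun c => !PySem.Chars.isalpha c) = t := by
    rw [hcs]; exact takeWhile_nonalpha t rest a0 ht ha0
  have h := findFirst_go cs cs.length 0 (by omega) (by simpa using hany)
  simpa [htw] using h

theorem last_eq (cs front u' : List Char) (alast : Char)
    (hcs : cs = front ++ alast :: u')
    (hu : ∀ c ∈ u', PySem.Chars.isalpha c = false) (hal : PySem.Chars.isalpha alast = true) :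
    findLastAlpha cs cs.length = front.length + 1 := by
  have hany : cs.any (fun c => PySem.Chars.isalpha c) = true := by
    rw [hcs]; simp [List.any_append, hal]
  have htw : cs.reverse.takeWhile (fun c => !PySem.Chars.isalpha c) = u'.reverse := by
    have hrev : cs.reverse = u'.reverse ++ alast :: front.reverse := by
      rw [hcs]; simp
    rw [hrev]
    exact takeWhile_nonalpha u'.reverse front.reverse alast
      (fun c hm => hu c (by simpa using hm)) hal
  have h := findLast_go cs cs.length (le_refl _) (by simpa using hany)
  rw [List.take_length, htw] at h
  have hlen : cs.length = front.length + 1 + u'.length := by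
    rw [hcs]; simp only [List.length_append, List.length_cons] <;> omega
  rw [h]
  simp only [List.length_reverse]
  omega

theorem filter_decomp (t mid u' : List Char) (a0 alast : Char)
    (ht : ∀ c ∈ t, PySem.Chars.isalpha c = false)
    (hu : ∀ c ∈ u', PySem.Chars.isalpha c = false)
    (ha0 : PySem.Chars.isalpha a0 = true) (halast : PySem.Chars.isalpha alast = true) :
    ((t ++ [a0]) ++ mid ++ (alast :: u')).filter (fun c => PySem.Chars.isalpha c)
      = a0 :: (mid.filter (fun c => PySem.Chars.isalpha c) ++ [alast]) := by
  have ht0 : t.filter (fun c => PySem.Chars.isalpha c) = [] :=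
    List.filter_eq_nil_iff.mpr (fun c hm => by simp [ht c hm])
  have hu0 : u'.filter (fun c => PySem.Chars.isalpha c) = [] :=
    List.filter_eq_nil_iff.mpr (fun c hm => by simp [hu c hm])
  simp [List.filter_append, List.filter_cons, ht0, hu0, ha0, halast]

theorem slice_singleton (x : Char) :
    PySem.List.slice [x] (some 1) (some (-1)) = ([] : List Char) := by
  simp [PySem.List.slice, PySem.List.clampIdx]

theorem slice_mid (a0 alast : Char) (mf : List Char) :
    PySem.List.slice ((a0 :: mf) ++ [alast]) (some 1) (some (-1)) = mf := by
  simp only [PySem.List.slice, PySem.List.clampIdx]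
  norm_num
  rw [if_neg (by omega)]
  simp [List.take_left]

theorem transform_eval_single (word : String) (a : Char)
    (hfilter : word.toList.filter (fun c => PySem.Chars.isalpha c) = [a]) :
    transform word = word := by
  have hcount : word.toList.countP (fun c => PySem.Chars.isalpha c) ≤ ([a] ++ [a] : List Char).length := by
    rw [List.countP_eq_length_filter, hfilter]; simp
  simp only [transform]
  rw [PySem.List.foldl_append_if_eq_filter]
  simp only [List.nil_append, hfilter]
  rw [PySem.List.pyGet?_zero_cons, PySem.List.pyGet?_neg_one]
  simp only [List.getLast?_singleton, slice_singleton]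
  have hl := loopA word.toList ([a] ++ [a]) [] hcount
  simp only [List.nil_append] at hl
  simp only [PySem.List.sorted, List.foldl_nil]
  rw [show ([a] ++ [] ++ [a] : List Char).reverse = ([a] ++ [a] : List Char).reverse from rfl, hl]
  rw [show ([a] ++ [a] : List Char) = word.toList.filter (fun c => PySem.Chars.isalpha c) ++ [a] by rw [hfilter]]
  rw [fill_filter_self]
  simp

theorem transform_eval (word : String) (a0 alast : Char) (mf : List Char)
    (hfilter : word.toList.filter (fun c => PySem.Chars.isalpha c) = (a0 :: mf) ++ [alast]) :
    transform word
      = String.ofList (fillSeq word.toList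
          ([a0] ++ PySem.List.sorted mf (fun c => c) false ++ [alast])) := by
  have hcount : word.toList.countP (fun c => PySem.Chars.isalpha c)
      ≤ ([a0] ++ PySem.List.sorted mf (fun c => c) false ++ [alast]).length := by
    rw [List.countP_eq_length_filter, hfilter]
    simp [PySem.List.length_sorted]
  simp only [transform]
  rw [PySem.List.foldl_append_if_eq_filter]
  simp only [List.nil_append, hfilter]
  rw [show ((a0 :: mf) ++ [alast] : List Char) = a0 :: (mf ++ [alast]) from rfl,
    PySem.List.pyGet?_zero_cons]
  rw [show (a0 :: (mf ++ [alast]) : List Char) = (a0 :: mf) ++ [alast] from rfl,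
    PySem.List.pyGet?_neg_one, List.getLast?_concat]
  simp only [slice_mid]
  have hl := loopA word.toList ([a0] ++ PySem.List.sorted mf (fun c => c) false ++ [alast]) [] hcount
  simp only [List.nil_append] at hl
  rw [hl]

theorem fill_decomp (t mid u' S' : List Char) (a0 alast : Char)
    (ht : ∀ c ∈ t, PySem.Chars.isalpha c = false)
    (hu : ∀ c ∈ u', PySem.Chars.isalpha c = false)
    (ha0 : PySem.Chars.isalpha a0 = true) (halast : PySem.Chars.isalpha alast = true)
    (hS : mid.countP (fun c => PySem.Chars.isalpha c) = S'.length) :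
    fillSeq ((t ++ [a0]) ++ mid ++ (alast :: u')) ([a0] ++ S' ++ [alast])
      = (t ++ [a0]) ++ fillSeq mid S' ++ (alast :: u') := by
  have hct : (t ++ [a0]).countP (fun c => PySem.Chars.isalpha c) = 1 := by
    rw [List.countP_append, List.countP_eq_zero.mpr (fun c hm => by simp [ht c hm])]
    simp [List.countP_cons, ha0]
  have h1 : fillSeq (t ++ [a0]) ([a0] ++ S' ++ [alast]) = t ++ [a0] := by
    rw [fill_append, fill_nonalpha t _ ht, List.countP_eq_zero.mpr (fun c hm => by simp [ht c hm])]
    simp [fillSeq, ha0]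
  have h2 : ([a0] ++ S' ++ [alast]).drop 1 = S' ++ [alast] := by simp
  have hct2 : List.countP (fun c => PySem.Chars.isalpha c) ((t ++ [a0]) ++ mid)
      = ([a0] ++ S').length := by
    rw [List.countP_append, hct, hS]
    simp only [List.length_append, List.length_cons, List.length_nil] <;> omega
  have h3 : fillSeq (alast :: u') [alast] = alast :: u' := by
    simp [fillSeq, halast, fill_nonalpha u' [] hu]
  rw [fill_append, fill_append, hct, h1, h2, fill_extra mid S' [alast] (le_of_eq hS),
    hct2, List.drop_left, h3]

theorem alt_eval (word : String) (t mid u' : List Char) (a0 alast : Char)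
    (hcs : word.toList = (t ++ [a0]) ++ mid ++ (alast :: u'))
    (ht : ∀ c ∈ t, PySem.Chars.isalpha c = false)
    (hu : ∀ c ∈ u', PySem.Chars.isalpha c = false)
    (ha0 : PySem.Chars.isalpha a0 = true) (halast : PySem.Chars.isalpha alast = true) :
    transform_alt word
      = String.ofList ((t ++ [a0])
          ++ fillSeq mid (PySem.List.sorted (mid.filter (fun c => PySem.Chars.isalpha c)) (fun c => c) false)
          ++ (alast :: u')) := by
  have hcs' : word.toList = (t ++ [a0]) ++ (mid ++ (alast :: u')) := by
    rw [hcs, List.append_assoc]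
  have hlen : word.toList.length = t.length + 1 + mid.length + 1 + u'.length := by
    rw [hcs]; simp only [List.length_append, List.length_cons, List.length_nil] <;> omega
  have hfirst : findFirstAlpha word.toList word.toList.length 0 word.toList.length = t.length :=
    first_eq word.toList t (mid ++ (alast :: u')) a0 (by rw [hcs', List.append_assoc, List.singleton_append]) ht ha0
  have hlast : findLastAlpha word.toList word.toList.length = ((t ++ [a0]) ++ mid).length + 1 :=
    last_eq word.toList ((t ++ [a0]) ++ mid) u' alast (by rw [hcs]) hu halast
  have hfrontlen : ((t ++ [a0]) ++ mid).length = t.length + 1 + mid.length := by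
    simp only [List.length_append, List.length_cons, List.length_nil] <;> omega
  -- segment extraction
  have hdrop1 : word.toList.drop (t.length + 1) = mid ++ (alast :: u') := by
    rw [hcs', show t.length + 1 = (t ++ [a0]).length by
      simp only [List.length_append, List.length_cons, List.length_nil] <;> omega, List.drop_left]
  have hmid : (word.toList.drop (t.length + 1)).take mid.length = mid := by
    rw [hdrop1, List.take_left]
  have hpre : word.toList.take (t.length + 1) = t ++ [a0] := by
    rw [hcs', show t.length + 1 = (t ++ [a0]).length by
      simp only [List.length_append, List.length_cons, List.length_nil] <;> omega, List.take_left]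
  have hsuf : word.toList.drop (t.length + 1 + mid.length) = alast :: u' := by
    rw [hcs, show t.length + 1 + mid.length = ((t ++ [a0]) ++ mid).length by
      simp only [List.length_append, List.length_cons, List.length_nil] <;> omega, List.drop_left]
  simp only [transform_alt]
  rw [hfirst, if_neg (by omega)]
  rw [hlast, if_neg (by simp only [hfrontlen]; omega)]
  -- cast normalisation of the slice bounds
  have e1 : ((t.length : Int) + 1) = ((t.length + 1 : Nat) : Int) := by push_cast; ring
  have e2 : ((((t ++ [a0]) ++ mid).length + 1 : Nat) : Int) - 1
      = ((t.length + 1 + mid.length : Nat) : Int) := by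
    rw [hfrontlen]; push_cast; ring
  rw [e1, e2, PySem.List.slice_natCast, PySem.List.slice_to_natCast, PySem.List.slice_from_natCast]
  rw [show t.length + 1 + mid.length - (t.length + 1) = mid.length by omega]
  rw [hmid, hpre, hsuf]
  -- histogram
  set mf := mid.filter (fun c => PySem.Chars.isalpha c) with hmf
  have hhist : ∀ code : Nat,
      (mid.foldl
        (fun (cnt : List Nat) c =>
          if PySem.Chars.isalpha c then cnt.set c.toNat (cnt.getD c.toNat 0 + 1) else cnt)
        (List.replicate 128 0)).getD code 0
      = mf.countP (fun c => c.toNat == code) := by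
    intro code
    rw [hist_getD mid (List.replicate 128 0) code
      (fun c _ hc => by rw [List.length_replicate]; exact alpha_toNat_lt c hc)]
    rw [getD_replicate_zero]
    simp [hmf]
  rw [PySem.List.foldl_append_eq_flatMap]
  simp only [List.nil_append]
  set counts := mid.foldl
        (fun (cnt : List Nat) c =>
          if PySem.Chars.isalpha c then cnt.set c.toNat (cnt.getD c.toNat 0 + 1) else cnt)
        (List.replicate 128 0) with hcounts
  set stream := (List.range 128).flatMap
      (fun code => List.replicate (counts.getD code 0) (Char.ofNat code)) with hstream
  have hperm : stream.Perm mf := by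
    rw [List.perm_iff_count]
    intro v
    by_cases hv : v.toNat < 128
    · rw [hstream, count_stream counts v hv, hhist v.toNat, List.count_eq_countP]
      apply List.countP_congr
      intro c _
      constructor
      · intro h; have := toNat_inj c v (by simpa using h); simp [this]
      · intro h
        have hcv : c = v := by simpa using h
        simp [hcv]
    · have h1 : stream.count v = 0 := by
        rw [List.count_eq_zero]
        intro hmem
        rw [hstream] at hmem
        rcases List.mem_flatMap.mp hmem with ⟨code, hcode, hrep⟩
        simp only [List.mem_range] at hcode
        have := List.eq_of_mem_replicate hrep
        exact hv (by rw [this, toNat_ofNat_lt code hcode]; omega)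
      have h2 : mf.count v = 0 := by
        rw [List.count_eq_zero]
        intro hmem
        rw [hmf] at hmem
        have := List.of_mem_filter hmem
        exact hv (by simpa using alpha_toNat_lt v (by simpa using this))
      rw [h1, h2]
  have hpair : stream.Pairwise (fun a b => a ≤ b) := by rw [hstream]; exact stream_pairwise counts
  have hsorted : PySem.List.sorted mf (fun c => c) false = stream :=
    PySem.List.sorted_id_eq_of_perm_of_pairwise mf stream hperm hpair
  have hcount : mid.countP (fun c => PySem.Chars.isalpha c) + 0 ≤ stream.length := by
    rw [hperm.length_eq, List.countP_eq_length_filter, ← hmf]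
    omega
  have hloop := loopB mid stream [] 0 hcount
  simp only [List.nil_append, List.drop_zero] at hloop
  rw [hloop, hsorted]

-- ===== VERDICT: the main equivalence =====
theorem transform_spec : Claim_equal_transform := by
  intro word _ hpre
  unfold Spec_transform
  unfold Pre_transform at hpre
  -- decompose around the first alphabetic character
  have hne : word.toList.dropWhile (fun c => !PySem.Chars.isalpha c) ≠ [] := by
    intro h0
    rw [List.dropWhile_eq_nil_iff] at h0
    rcases List.any_eq_true.mp hpre with ⟨c, hc, hca⟩
    have := h0 c hc
    simp [hca] at this
  obtain ⟨a0, rest, hr⟩ := List.exists_cons_of_ne_nil hne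
  have ha0 : PySem.Chars.isalpha a0 = true := by
    have h := List.head_dropWhile_not (fun c => !PySem.Chars.isalpha c) hne
    rw [head_eq_of_eq_cons hr hne] at h
    simpa using h
  have ht : ∀ c ∈ word.toList.takeWhile (fun c => !PySem.Chars.isalpha c),
      PySem.Chars.isalpha c = false := by
    intro c hm
    have := List.mem_takeWhile_imp hm
    simpa using this
  have hsplit1 : word.toList = word.toList.takeWhile (fun c => !PySem.Chars.isalpha c) ++ a0 :: rest := by
    conv_lhs => rw [← List.takeWhile_append_dropWhile (p := fun c => !PySem.Chars.isalpha c) (l := word.toList)]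
    rw [hr]
  set t := word.toList.takeWhile (fun c => !PySem.Chars.isalpha c) with htdef
  -- decompose around the last alphabetic character (via the reverse)
  have hpreR : word.toList.reverse.any (fun c => PySem.Chars.isalpha c) = true := by
    rcases List.any_eq_true.mp hpre with ⟨c, hc, hca⟩
    exact List.any_eq_true.mpr ⟨c, by simpa using hc, hca⟩
  have hneR : word.toList.reverse.dropWhile (fun c => !PySem.Chars.isalpha c) ≠ [] := by
    intro h0
    rw [List.dropWhile_eq_nil_iff] at h0
    rcases List.any_eq_true.mp hpreR with ⟨c, hc, hca⟩
    have := h0 c hc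
    simp [hca] at this
  obtain ⟨alast, v', hrv⟩ := List.exists_cons_of_ne_nil hneR
  have halast : PySem.Chars.isalpha alast = true := by
    have h := List.head_dropWhile_not (fun c => !PySem.Chars.isalpha c) hneR
    rw [head_eq_of_eq_cons hrv hneR] at h
    simpa using h
  have hu : ∀ c ∈ word.toList.reverse.takeWhile (fun c => !PySem.Chars.isalpha c),
      PySem.Chars.isalpha c = false := by
    intro c hm
    have := List.mem_takeWhile_imp hm
    simpa using this
  set u := word.toList.reverse.takeWhile (fun c => !PySem.Chars.isalpha c) with hudef
  have hsplit2 : word.toList.reverse = u ++ alast :: v' := by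
    conv_lhs => rw [← List.takeWhile_append_dropWhile (p := fun c => !PySem.Chars.isalpha c) (l := word.toList.reverse)]
    rw [hrv]
  have hcs2 : word.toList = v'.reverse ++ alast :: u.reverse := by
    have h := congrArg List.reverse hsplit2
    rw [List.reverse_reverse] at h
    rw [h]
    simp
  -- the first alphabetic index is ≤ the last one
  have hple : t.length ≤ v'.length := by
    by_contra hgt
    push_neg at hgt
    have h1 : word.toList[v'.length]? = some alast := by
      rw [hcs2]
      have h2 := PySem.List.pyGet?_append_length v'.reverse u.reverse alast
      rw [PySem.List.pyGet?_natCast] at h2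
      simpa using h2
    have h3 : t[v'.length]? = some alast := by
      rw [hsplit1, List.getElem?_append_left (by omega)] at h1
      exact h1
    have h4 := ht alast (List.mem_of_getElem? h3)
    rw [h4] at halast
    exact Bool.false_ne_true halast
  by_cases hpq : t.length = v'.length
  · -- exactly one alphabetic character: both programs return the word unchanged
    have heq : t = v'.reverse ∧ a0 :: rest = alast :: u.reverse :=
      List.append_inj (hsplit1.symm.trans hcs2) (by simpa using hpq)
    have hrest : rest = u.reverse := by
      have h := heq.2
      injection h
    have hfilter : word.toList.filter (fun c => PySem.Chars.isalpha c) = [a0] := by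
      rw [hsplit1, List.filter_append, List.filter_cons]
      rw [List.filter_eq_nil_iff.mpr (fun c hm => by simp [ht c hm])]
      rw [hrest, List.filter_eq_nil_iff.mpr (fun c hm => by simp [hu c (by simpa using hm)])]
      simp [ha0]
    rw [transform_eval_single word a0 hfilter]
    have hBfirst := first_eq word.toList t rest a0 hsplit1 ht ha0
    have hBlast : findLastAlpha word.toList word.toList.length = t.length + 1 :=
      last_eq word.toList t u.reverse alast (by rw [hsplit1, heq.2])
        (fun c hm => hu c (by simpa using hm)) halast
    have hlen1 : word.toList.length = t.length + 1 + rest.length := by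
      rw [hsplit1]; simp only [List.length_append, List.length_cons] <;> omega
    simp only [transform_alt]
    rw [hBfirst, if_neg (by omega), hBlast, if_pos (by omega)]
  · have hplt : t.length < v'.length := lt_of_le_of_ne hple hpq
    -- build the three-segment decomposition
    have hpre1 : word.toList.take (t.length + 1) = t ++ [a0] := by
      rw [hsplit1, List.take_append]
      simp
    have hsuf1 : word.toList.drop v'.length = alast :: u.reverse := by
      rw [hcs2, show v'.length = v'.reverse.length by simp, List.drop_left]
    set mid := (word.toList.drop (t.length + 1)).take (v'.length - (t.length + 1)) with hmiddef
    have hmidlen : mid.length = v'.length - (t.length + 1) := by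
      rw [hmiddef]
      rw [List.length_take, List.length_drop]
      have : v'.length < word.toList.length := by
        rw [hcs2]
        simp only [List.length_append, List.length_cons, List.length_reverse] <;> omega
      omega
    have hdecomp : word.toList = (t ++ [a0]) ++ mid ++ (alast :: u.reverse) := by
      have h1 : word.toList = word.toList.take (t.length + 1) ++ word.toList.drop (t.length + 1) :=
        (List.take_append_drop _ _).symm
      have h2 : word.toList.drop (t.length + 1)
          = mid ++ (word.toList.drop (t.length + 1)).drop (v'.length - (t.length + 1)) := by
        rw [hmiddef]
        exact (List.take_append_drop _ _).symm
      have h3 : (word.toList.drop (t.length + 1)).drop (v'.length - (t.length + 1))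
          = word.toList.drop v'.length := by
        rw [List.drop_drop]
        congr 1
        omega
      calc word.toList = word.toList.take (t.length + 1) ++ word.toList.drop (t.length + 1) := h1
        _ = (t ++ [a0]) ++ (mid ++ word.toList.drop v'.length) := by rw [hpre1, h2, h3]
        _ = (t ++ [a0]) ++ mid ++ (alast :: u.reverse) := by rw [hsuf1, ← List.append_assoc]
    have hu' : ∀ c ∈ u.reverse, PySem.Chars.isalpha c = false :=
      fun c hm => hu c (by simpa using hm)
    have hfilter : word.toList.filter (fun c => PySem.Chars.isalpha c)
        = (a0 :: mid.filter (fun c => PySem.Chars.isalpha c)) ++ [alast] := by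
      conv_lhs => rw [hdecomp]
      rw [filter_decomp t mid u.reverse a0 alast ht hu' ha0 halast]
      simp
    rw [transform_eval word a0 alast (mid.filter (fun c => PySem.Chars.isalpha c)) hfilter]
    rw [alt_eval word t mid u.reverse a0 alast hdecomp ht hu' ha0 halast]
    congr 1
    conv_lhs => rw [hdecomp]
    rw [fill_decomp t mid u.reverse _ a0 alast ht hu' ha0 halast]
    rw [List.countP_eq_length_filter, PySem.List.length_sorted]


@[simp] theorem transform_raises : Claim_raises_transform := by
  unfold Claim_raises_transform
  refine ⟨?_, by decide⟩
  intro word _ hr hp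
  unfold Raises_transform at hr
  unfold Pre_transform at hp
  simp [hr] at hp
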